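-- pv_equiv track=rewrite | github.com/TrumanHarp/Japanese-Bulk-Card-Creator | kana_romaji.py | _apply_macrons
-- ===== SOURCE A (Python) =====
-- def _apply_macrons(basic: str) -> str:
--     """
--     Very rough long-vowel handling for Hepburn with macrons.
--
--     True 'perfect' behavior needs lexical knowledge, but
--     this covers the big patterns.
--     """
--     repl = (
--         ("aa", "ā"),
--         ("ii", "ī"),
--         ("uu", "ū"),
--         ("ee", "ē"),
--         ("oo", "ō"),
--         ("ou", "ō"),
--     )
--     s = basic
--     for src, dst in repl:
--         s = s.replace(src, dst)
--     return s
-- ===== SOURCE B (Python) =====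
-- MACRON = {'a': '\u0101', 'i': '\u012b', 'u': '\u016b', 'e': '\u0113'}
--
-- def _apply_macrons(basic: str) -> str:
--     """
--     Very rough long-vowel handling for Hepburn with macrons.
--
--     True 'perfect' behavior needs lexical knowledge, but
--     this covers the big patterns.
--     """
--     out = []
--     i = 0
--     n = len(basic)
--     while i < n:
--         c = basic[i]
--         nxt = basic[i + 1] if i + 1 < n else ''
--         if c == nxt and c in MACRON:
--             out.append(MACRON[c])
--             i += 2
--         elif c == 'o' and (nxt == 'o' or (nxt == 'u' and (i + 2 >= n or basic[i + 2] != 'u'))):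
--             out.append('\u014d')
--             i += 2
--         else:
--             out.append(c)
--             i += 1
--     return ''.join(out)
-- ===== Notes on version B (the rewrite author's own statement) =====
-- stated objective: alternative
-- what changed: Replaced six sequential whole-string str.replace passes by a single left-to-right scan with one character of lookahead that emits each macron directly (the 'ou' pair merges only when its 'u' does not start a 'uu' pair, reproducing A's replace order).
import Mathlib
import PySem

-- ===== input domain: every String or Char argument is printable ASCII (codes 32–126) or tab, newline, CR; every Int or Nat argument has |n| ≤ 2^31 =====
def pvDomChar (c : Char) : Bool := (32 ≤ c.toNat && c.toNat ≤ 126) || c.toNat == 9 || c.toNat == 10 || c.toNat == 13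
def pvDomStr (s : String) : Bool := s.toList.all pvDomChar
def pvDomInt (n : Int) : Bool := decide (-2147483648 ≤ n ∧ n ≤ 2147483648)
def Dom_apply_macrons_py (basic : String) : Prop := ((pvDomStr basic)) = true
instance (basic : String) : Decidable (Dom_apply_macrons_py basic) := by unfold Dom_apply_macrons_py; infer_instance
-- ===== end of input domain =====

-- B replaces A's six sequential str.replace passes by a single left-to-right scan with
-- one character of lookahead ('ou' merges only when the 'u' is not the start of a 'uu'
-- pair, matching A's replace order); alternative decomposition, no speed claim.

-- ===== PORT A =====
def apply_macrons_py (basic : String) : String :=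
  let repl : List (String × String) :=
    [("aa", "ā"), ("ii", "ī"), ("uu", "ū"), ("ee", "ē"), ("oo", "ō"), ("ou", "ō")]
  repl.foldl (fun s p => PySem.Str.replace s p.1 p.2) basic

-- ===== PORT B =====
-- the single left-to-right scan of Source B (its while-loop over indices, as structural
-- recursion over the character list; Source B's basic[i+2] lookahead is t.head?)
def pvAltScan : List Char → List Char
  | c1 :: c2 :: t =>
    if c1 = 'a' ∧ c2 = 'a' then 'ā' :: pvAltScan t
    else if c1 = 'i' ∧ c2 = 'i' then 'ī' :: pvAltScan t
    else if c1 = 'u' ∧ c2 = 'u' then 'ū' :: pvAltScan t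
    else if c1 = 'e' ∧ c2 = 'e' then 'ē' :: pvAltScan t
    else if c1 = 'o' ∧ c2 = 'o' then 'ō' :: pvAltScan t
    else if c1 = 'o' ∧ c2 = 'u' ∧ t.head? ≠ some 'u' then 'ō' :: pvAltScan t
    else c1 :: pvAltScan (c2 :: t)
  | l => l
termination_by l => l.length

def apply_macrons_py_alt (basic : String) : String :=
  String.ofList (pvAltScan basic.toList)

-- ===== PRECONDITION & SPEC =====
def Spec_apply_macrons_py (basic : String) (out : String) : Prop := out = apply_macrons_py_alt basic
instance (basic : String) (out : String) : Decidable (Spec_apply_macrons_py basic out) := by unfold Spec_apply_macrons_py; infer_instance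

-- ===== CLAIM (what is proved, stated in full; the proofs are below) =====
def Claim_equal_apply_macrons_py : Prop := ∀ (basic : String), Dom_apply_macrons_py basic → Spec_apply_macrons_py basic (apply_macrons_py basic)

-- ===== LEMMAS AND PROOFS =====

-- what one str.replace with a two-character pattern computes: a greedy two-char scan
def pvPairScan (x y m : Char) : List Char → List Char
  | a :: b :: t =>
    if a = x ∧ b = y then m :: pvPairScan x y m t else a :: pvPairScan x y m (b :: t)
  | l => l
termination_by l => l.length

theorem pvReplaceGo_eq (x y m : Char) (fuel : Nat) (l acc : List Char)
    (h : l.length ≤ fuel) :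
    PySem.Chars.replace.go [x, y] [m] fuel l acc = acc.reverse ++ pvPairScan x y m l := by
  induction fuel generalizing l acc with
  | zero =>
    have : l = [] := by cases l <;> simp_all
    subst this
    simp [PySem.Chars.replace.go, pvPairScan]
  | succ n ih =>
    cases l with
    | nil => simp [PySem.Chars.replace.go, pvPairScan]
    | cons a t =>
      rw [PySem.Chars.replace.go]
      cases t with
      | nil =>
        have hpre : List.isPrefixOf [x, y] [a] = false := by simp [List.isPrefixOf]
        simp only [hpre, Bool.false_eq_true, if_false]
        rw [ih [] (a :: acc) (by simp)]
        simp [pvPairScan]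
      | cons b t' =>
        by_cases hab : a = x ∧ b = y
        · obtain ⟨rfl, rfl⟩ := hab
          have hpre : List.isPrefixOf [a, b] (a :: b :: t') = true := by
            simp [List.isPrefixOf]
          simp only [hpre, if_true, List.length_cons, List.length_nil,
            List.drop_succ_cons, List.drop_zero]
          rw [ih t' ([m].reverse ++ acc) (by simp at h ⊢; omega)]
          rw [pvPairScan, if_pos ⟨rfl, rfl⟩]
          simp
        · have hpre : List.isPrefixOf [x, y] (a :: b :: t') = false := by
            simp [List.isPrefixOf]; tauto
          simp only [hpre, Bool.false_eq_true, if_false]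
          rw [ih (b :: t') (a :: acc) (by simp at h ⊢; omega)]
          rw [pvPairScan, if_neg hab]
          simp

theorem pvReplace_eq (x y m : Char) (s : List Char) :
    PySem.Chars.replace s [x, y] [m] = pvPairScan x y m s := by
  simp [PySem.Chars.replace, pvReplaceGo_eq x y m s.length s [] le_rfl]

theorem pvPairScan_skip (x y m a : Char) (l : List Char)
    (h : ¬(a = x ∧ l.head? = some y)) :
    pvPairScan x y m (a :: l) = a :: pvPairScan x y m l := by
  cases l with
  | nil => simp [pvPairScan]
  | cons b t => rw [pvPairScan, if_neg (by simpa using h)]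

theorem pvNe_skip (x y m a : Char) (l : List Char) (h : ¬a = x) :
    pvPairScan x y m (a :: l) = a :: pvPairScan x y m l :=
  pvPairScan_skip x y m a l (fun hc => h hc.1)

theorem pvPairScan_match (x y m : Char) (t : List Char) :
    pvPairScan x y m (x :: y :: t) = m :: pvPairScan x y m t := by
  rw [pvPairScan, if_pos ⟨rfl, rfl⟩]

theorem pvPairScan_head_ne (x y m c : Char) (hm : m ≠ c) (l : List Char)
    (h : l.head? ≠ some c) : (pvPairScan x y m l).head? ≠ some c := by
  match l with
  | [] => intro hc; simp [pvPairScan] at hc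
  | [a] => simpa [pvPairScan] using h
  | a :: b :: t =>
    rw [pvPairScan]
    split_ifs <;> simp_all

-- the six replace passes of A, as scans
def pvChain (l : List Char) : List Char :=
  pvPairScan 'o' 'u' 'ō' (pvPairScan 'o' 'o' 'ō' (pvPairScan 'e' 'e' 'ē'
    (pvPairScan 'u' 'u' 'ū' (pvPairScan 'i' 'i' 'ī' (pvPairScan 'a' 'a' 'ā' l)))))

theorem pvChain_aa (t : List Char) : pvChain ('a' :: 'a' :: t) = 'ā' :: pvChain t := by
  unfold pvChain
  rw [pvPairScan_match,
      pvNe_skip 'i' 'i' 'ī' 'ā' _ (by decide), pvNe_skip 'u' 'u' 'ū' 'ā' _ (by decide),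
      pvNe_skip 'e' 'e' 'ē' 'ā' _ (by decide), pvNe_skip 'o' 'o' 'ō' 'ā' _ (by decide),
      pvNe_skip 'o' 'u' 'ō' 'ā' _ (by decide)]

theorem pvChain_ii (t : List Char) : pvChain ('i' :: 'i' :: t) = 'ī' :: pvChain t := by
  unfold pvChain
  rw [pvNe_skip 'a' 'a' 'ā' 'i' _ (by decide), pvNe_skip 'a' 'a' 'ā' 'i' _ (by decide),
      pvPairScan_match,
      pvNe_skip 'u' 'u' 'ū' 'ī' _ (by decide), pvNe_skip 'e' 'e' 'ē' 'ī' _ (by decide),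
      pvNe_skip 'o' 'o' 'ō' 'ī' _ (by decide), pvNe_skip 'o' 'u' 'ō' 'ī' _ (by decide)]

theorem pvChain_uu (t : List Char) : pvChain ('u' :: 'u' :: t) = 'ū' :: pvChain t := by
  unfold pvChain
  rw [pvNe_skip 'a' 'a' 'ā' 'u' _ (by decide), pvNe_skip 'a' 'a' 'ā' 'u' _ (by decide),
      pvNe_skip 'i' 'i' 'ī' 'u' _ (by decide), pvNe_skip 'i' 'i' 'ī' 'u' _ (by decide),
      pvPairScan_match,
      pvNe_skip 'e' 'e' 'ē' 'ū' _ (by decide), pvNe_skip 'o' 'o' 'ō' 'ū' _ (by decide),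
      pvNe_skip 'o' 'u' 'ō' 'ū' _ (by decide)]

theorem pvChain_ee (t : List Char) : pvChain ('e' :: 'e' :: t) = 'ē' :: pvChain t := by
  unfold pvChain
  rw [pvNe_skip 'a' 'a' 'ā' 'e' _ (by decide), pvNe_skip 'a' 'a' 'ā' 'e' _ (by decide),
      pvNe_skip 'i' 'i' 'ī' 'e' _ (by decide), pvNe_skip 'i' 'i' 'ī' 'e' _ (by decide),
      pvNe_skip 'u' 'u' 'ū' 'e' _ (by decide), pvNe_skip 'u' 'u' 'ū' 'e' _ (by decide),
      pvPairScan_match,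
      pvNe_skip 'o' 'o' 'ō' 'ē' _ (by decide), pvNe_skip 'o' 'u' 'ō' 'ē' _ (by decide)]

theorem pvChain_oo (t : List Char) : pvChain ('o' :: 'o' :: t) = 'ō' :: pvChain t := by
  unfold pvChain
  rw [pvNe_skip 'a' 'a' 'ā' 'o' _ (by decide), pvNe_skip 'a' 'a' 'ā' 'o' _ (by decide),
      pvNe_skip 'i' 'i' 'ī' 'o' _ (by decide), pvNe_skip 'i' 'i' 'ī' 'o' _ (by decide),
      pvNe_skip 'u' 'u' 'ū' 'o' _ (by decide), pvNe_skip 'u' 'u' 'ū' 'o' _ (by decide),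
      pvNe_skip 'e' 'e' 'ē' 'o' _ (by decide), pvNe_skip 'e' 'e' 'ē' 'o' _ (by decide),
      pvPairScan_match,
      pvNe_skip 'o' 'u' 'ō' 'ō' _ (by decide)]

theorem pvChain_ou1 (t : List Char) (ht : t.head? ≠ some 'u') :
    pvChain ('o' :: 'u' :: t) = 'ō' :: pvChain t := by
  have hu2 : (pvPairScan 'i' 'i' 'ī' (pvPairScan 'a' 'a' 'ā' t)).head? ≠ some 'u' :=
    pvPairScan_head_ne _ _ _ _ (by decide) _ (pvPairScan_head_ne _ _ _ _ (by decide) _ ht)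
  unfold pvChain
  rw [pvNe_skip 'a' 'a' 'ā' 'o' _ (by decide), pvNe_skip 'a' 'a' 'ā' 'u' _ (by decide),
      pvNe_skip 'i' 'i' 'ī' 'o' _ (by decide), pvNe_skip 'i' 'i' 'ī' 'u' _ (by decide),
      pvNe_skip 'u' 'u' 'ū' 'o' _ (by decide),
      pvPairScan_skip 'u' 'u' 'ū' 'u' _ (fun hc => hu2 hc.2),
      pvNe_skip 'e' 'e' 'ē' 'o' _ (by decide), pvNe_skip 'e' 'e' 'ē' 'u' _ (by decide),
      pvPairScan_skip 'o' 'o' 'ō' 'o' _ (by simp),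
      pvNe_skip 'o' 'o' 'ō' 'u' _ (by decide),
      pvPairScan_match]

theorem pvChain_ou2 (t : List Char) :
    pvChain ('o' :: 'u' :: 'u' :: t) = 'o' :: 'ū' :: pvChain t := by
  unfold pvChain
  rw [pvNe_skip 'a' 'a' 'ā' 'o' _ (by decide), pvNe_skip 'a' 'a' 'ā' 'u' _ (by decide),
      pvNe_skip 'a' 'a' 'ā' 'u' _ (by decide),
      pvNe_skip 'i' 'i' 'ī' 'o' _ (by decide), pvNe_skip 'i' 'i' 'ī' 'u' _ (by decide),
      pvNe_skip 'i' 'i' 'ī' 'u' _ (by decide),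
      pvNe_skip 'u' 'u' 'ū' 'o' _ (by decide),
      pvPairScan_match,
      pvNe_skip 'e' 'e' 'ē' 'o' _ (by decide), pvNe_skip 'e' 'e' 'ē' 'ū' _ (by decide),
      pvPairScan_skip 'o' 'o' 'ō' 'o' _ (by simp),
      pvNe_skip 'o' 'o' 'ō' 'ū' _ (by decide),
      pvPairScan_skip 'o' 'u' 'ō' 'o' _ (by simp),
      pvNe_skip 'o' 'u' 'ō' 'ū' _ (by decide)]

theorem pvChain_cons (c : Char) (l : List Char)
    (ha : ¬(c = 'a' ∧ l.head? = some 'a')) (hi : ¬(c = 'i' ∧ l.head? = some 'i'))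
    (hu : ¬(c = 'u' ∧ l.head? = some 'u')) (he : ¬(c = 'e' ∧ l.head? = some 'e'))
    (ho : ¬(c = 'o' ∧ l.head? = some 'o')) (hou : ¬(c = 'o' ∧ l.head? = some 'u')) :
    pvChain (c :: l) = c :: pvChain l := by
  unfold pvChain
  rw [pvPairScan_skip 'a' 'a' 'ā' c _ ha,
      pvPairScan_skip 'i' 'i' 'ī' c _ (by
        rintro ⟨rfl, hh⟩
        exact pvPairScan_head_ne _ _ _ _ (by decide) _ (fun hl => hi ⟨rfl, hl⟩) hh),
      pvPairScan_skip 'u' 'u' 'ū' c _ (by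
        rintro ⟨rfl, hh⟩
        exact pvPairScan_head_ne _ _ _ _ (by decide) _
          (pvPairScan_head_ne _ _ _ _ (by decide) _ (fun hl => hu ⟨rfl, hl⟩)) hh),
      pvPairScan_skip 'e' 'e' 'ē' c _ (by
        rintro ⟨rfl, hh⟩
        exact pvPairScan_head_ne _ _ _ _ (by decide) _
          (pvPairScan_head_ne _ _ _ _ (by decide) _
            (pvPairScan_head_ne _ _ _ _ (by decide) _ (fun hl => he ⟨rfl, hl⟩))) hh),
      pvPairScan_skip 'o' 'o' 'ō' c _ (by
        rintro ⟨rfl, hh⟩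
        exact pvPairScan_head_ne _ _ _ _ (by decide) _
          (pvPairScan_head_ne _ _ _ _ (by decide) _
            (pvPairScan_head_ne _ _ _ _ (by decide) _
              (pvPairScan_head_ne _ _ _ _ (by decide) _ (fun hl => ho ⟨rfl, hl⟩)))) hh),
      pvPairScan_skip 'o' 'u' 'ō' c _ (by
        rintro ⟨rfl, hh⟩
        exact pvPairScan_head_ne _ _ _ _ (by decide) _
          (pvPairScan_head_ne _ _ _ _ (by decide) _
            (pvPairScan_head_ne _ _ _ _ (by decide) _
              (pvPairScan_head_ne _ _ _ _ (by decide) _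
                (pvPairScan_head_ne _ _ _ _ (by decide) _ (fun hl => hou ⟨rfl, hl⟩))))) hh)]

theorem pvChain_eq_altScan (l : List Char) : pvChain l = pvAltScan l := by
  induction l using pvAltScan.induct with
  | case1 a b t h ih =>
    obtain ⟨rfl, rfl⟩ := h
    rw [pvChain_aa, pvAltScan, if_pos ⟨rfl, rfl⟩, ih]
  | case2 a b t h1 h ih =>
    obtain ⟨rfl, rfl⟩ := h
    rw [pvChain_ii, pvAltScan, if_neg h1, if_pos ⟨rfl, rfl⟩, ih]
  | case3 a b t h1 h2 h ih =>
    obtain ⟨rfl, rfl⟩ := h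
    rw [pvChain_uu, pvAltScan, if_neg h1, if_neg h2, if_pos ⟨rfl, rfl⟩, ih]
  | case4 a b t h1 h2 h3 h ih =>
    obtain ⟨rfl, rfl⟩ := h
    rw [pvChain_ee, pvAltScan, if_neg h1, if_neg h2, if_neg h3, if_pos ⟨rfl, rfl⟩, ih]
  | case5 a b t h1 h2 h3 h4 h ih =>
    obtain ⟨rfl, rfl⟩ := h
    rw [pvChain_oo, pvAltScan, if_neg h1, if_neg h2, if_neg h3, if_neg h4,
        if_pos ⟨rfl, rfl⟩, ih]
  | case6 a b t h1 h2 h3 h4 h5 h ih =>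
    obtain ⟨rfl, rfl, ht⟩ := h
    rw [pvChain_ou1 t ht, pvAltScan, if_neg h1, if_neg h2, if_neg h3, if_neg h4,
        if_neg h5, if_pos ⟨rfl, rfl, ht⟩, ih]
  | case7 a b t h1 h2 h3 h4 h5 h6 ih =>
    have hrhs : pvAltScan (a :: b :: t) = a :: pvAltScan (b :: t) := by
      rw [pvAltScan, if_neg h1, if_neg h2, if_neg h3, if_neg h4, if_neg h5, if_neg h6]
    rw [hrhs, ← ih]
    by_cases hob : a = 'o' ∧ b = 'u'
    · obtain ⟨rfl, rfl⟩ := hob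
      have ht : t.head? = some 'u' := by
        by_contra hc
        exact h6 ⟨rfl, rfl, hc⟩
      obtain ⟨t', rfl⟩ : ∃ t', t = 'u' :: t' := by
        cases t with
        | nil => simp at ht
        | cons x s => simp at ht; exact ⟨s, by rw [ht]⟩
      rw [pvChain_ou2, pvChain_uu]
    · exact pvChain_cons a (b :: t)
        (by rintro ⟨rfl, hh⟩; simp at hh; exact h1 ⟨rfl, hh⟩)
        (by rintro ⟨rfl, hh⟩; simp at hh; exact h2 ⟨rfl, hh⟩)
        (by rintro ⟨rfl, hh⟩; simp at hh; exact h3 ⟨rfl, hh⟩)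
        (by rintro ⟨rfl, hh⟩; simp at hh; exact h4 ⟨rfl, hh⟩)
        (by rintro ⟨rfl, hh⟩; simp at hh; exact h5 ⟨rfl, hh⟩)
        (by rintro ⟨rfl, hh⟩; simp at hh; exact hob ⟨rfl, hh⟩)
  | case8 l h =>
    match l, h with
    | [], _ => simp [pvChain, pvPairScan, pvAltScan]
    | [c], _ => simp [pvChain, pvPairScan, pvAltScan]
    | a :: b :: t, h => exact absurd rfl (h a b t)

-- ===== VERDICT (by name: the statement is the Claim_ definition above) =====
theorem apply_macrons_py_spec : Claim_equal_apply_macrons_py := by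
  intro basic _
  unfold Spec_apply_macrons_py
  apply String.toList_inj.mp
  have hB : (apply_macrons_py_alt basic).toList = pvAltScan basic.toList := by
    simp [apply_macrons_py_alt]
  have hA : (apply_macrons_py basic).toList = pvChain basic.toList := by
    simp [apply_macrons_py, List.foldl, PySem.Str.toList_replace, pvChain, pvReplace_eq]
  rw [hA, hB, pvChain_eq_altScan]
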